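-- pv_equiv track=rewrite | github.com/filipedwan/CodeBench-Features-Extractor | Legacy extractor/tabelas_por_lista/por_lista.py | session
-- ===== SOURCE A (Python) =====
-- def session(codemirror,codes,grades,executions,lista,turma):
-- 	aux1,aux2,aux3,aux4=[],[],[],[]
-- 	for l in lista:
-- 		aux=len(l)-5
-- 		contador=0
-- 		while(contador<len(codemirror)):
-- 			ax=''
-- 			for elemento in codemirror[contador]:
-- 				if elemento!='_':
-- 					ax+=elemento
-- 				else:
-- 					break
-- 			if(l[:aux]==ax):
-- 				aux1=aux1+[codemirror[contador]]
-- 			contador+=1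
-- 		contador=0
-- 		while(contador<len(codes)):
-- 			ax=''
-- 			for elemento in codes[contador]:
-- 				if elemento!='_':
-- 					ax+=elemento
-- 				else:
-- 					break
-- 			if(l[:aux]==ax):
-- 				aux2=aux2+[codes[contador]]
-- 			contador+=1
-- 		contador=0
-- 		while(contador<len(executions)):
-- 			ax=''
-- 			for elemento in executions[contador]:
-- 				if elemento!='_':
-- 					ax+=elemento
-- 				else:
-- 					break
-- 			if(l[:aux]==ax):
-- 				aux4=aux4+[executions[contador]]
-- 			contador+=1
-- 		cont=0
-- 		while(cont<len(grades)):
-- 			ax=''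
-- 			for elemento in grades[cont]:
-- 				if elemento!='.':
-- 					ax+=elemento
-- 				else:
-- 					break
-- 			if(l[:aux]==ax):
-- 				aux3=aux3+[grades[cont]]
-- 			cont+=1
-- 	return [aux1,aux2,aux3,aux4]
-- ===== SOURCE B (Python) =====
-- def session(codemirror, codes, grades, executions, lista, turma):
--     # Group each source list once by the prefix before the first stop character,
--     # then answer each lista key by a dict lookup.
--     def group(items, stop):
--         d = {}
--         for x in items:
--             d.setdefault(x.partition(stop)[0], []).append(x)
--         return d
--     g1 = group(codemirror, '_')
--     g2 = group(codes, '_')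
--     g3 = group(grades, '.')
--     g4 = group(executions, '_')
--     out1, out2, out3, out4 = [], [], [], []
--     for l in lista:
--         key = l[:len(l) - 5]
--         out1 += g1.get(key, [])
--         out2 += g2.get(key, [])
--         out3 += g3.get(key, [])
--         out4 += g4.get(key, [])
--     return [out1, out2, out3, out4]
-- ===== Notes on version B (the rewrite author's own statement) =====
-- stated objective: faster
-- what changed: B precomputes each element's prefix once and groups every source list into a dict keyed by prefix, answering each lista key by a dict lookup instead of rescanning all four lists (rebuilding prefixes char by char) for every key.
import Mathlib
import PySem

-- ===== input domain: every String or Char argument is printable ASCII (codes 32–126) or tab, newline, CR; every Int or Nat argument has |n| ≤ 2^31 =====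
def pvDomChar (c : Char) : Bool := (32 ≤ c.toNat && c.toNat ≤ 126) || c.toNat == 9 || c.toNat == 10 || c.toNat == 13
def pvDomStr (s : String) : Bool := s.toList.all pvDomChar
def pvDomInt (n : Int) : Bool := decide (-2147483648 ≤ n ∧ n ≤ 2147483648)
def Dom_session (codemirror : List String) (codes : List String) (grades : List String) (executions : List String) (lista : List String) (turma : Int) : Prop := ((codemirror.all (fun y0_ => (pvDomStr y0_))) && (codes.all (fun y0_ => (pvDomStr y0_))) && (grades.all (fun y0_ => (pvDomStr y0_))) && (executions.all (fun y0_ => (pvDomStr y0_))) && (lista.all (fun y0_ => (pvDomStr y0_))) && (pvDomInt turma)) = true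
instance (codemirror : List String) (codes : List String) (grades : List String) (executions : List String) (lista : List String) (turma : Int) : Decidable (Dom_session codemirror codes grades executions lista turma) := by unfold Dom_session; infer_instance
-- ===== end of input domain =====

-- B groups each source list once in a dict keyed by the element's prefix and answers each
-- lista key by lookup, instead of rescanning every list (rebuilding each prefix) per key: faster.


-- ===== PORT A =====
-- A's inner "for elemento in s: if elemento != stop: ax += elemento else: break" loop
def sessionPref : List Char → Char → List Char
  | [], _ => []
  | c :: cs, stop => if c ≠ stop then c :: sessionPref cs stop else []

-- A's "while contador < len(items): … if l[:aux] == ax: auxK = auxK + [items[contador]]" loop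
def sessionScan (items : List String) (stop : Char) (key : List Char) (acc : List String) : List String :=
  items.foldl (fun acc s => if key == sessionPref s.toList stop then acc ++ [s] else acc) acc

def session (codemirror : List String) (codes : List String) (grades : List String) (executions : List String) (lista : List String) (turma : Int) : List (List String) :=
  let st := lista.foldl
    (fun (st : List String × List String × List String × List String) l =>
      let aux : Int := PySem.List.len l.toList - 5
      let key := PySem.List.slice l.toList none (some aux)   -- l[:aux]
      let a1 := sessionScan codemirror '_' key st.1
      let a2 := sessionScan codes '_' key st.2.1
      let a4 := sessionScan executions '_' key st.2.2.2
      let a3 := sessionScan grades '.' key st.2.2.1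
      (a1, a2, a3, a4))
    ([], [], [], [])
  [st.1, st.2.1, st.2.2.1, st.2.2.2]

-- ===== PORT B =====
-- B's group(): d.setdefault(x.partition(stop)[0], []).append(x); x.partition(stop)[0] is
-- the characters before the first stop, i.e. takeWhile (· != stop) — exact on every string.
def sessionAltGroup (items : List String) (stop : Char) : PySem.Dict (List Char) (List String) :=
  items.foldl
    (fun d x => d.modify (x.toList.takeWhile (fun c => c != stop)) [] (· ++ [x]))
    PySem.Dict.empty

def session_alt (codemirror : List String) (codes : List String) (grades : List String) (executions : List String) (lista : List String) (turma : Int) : List (List String) :=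
  let g1 := sessionAltGroup codemirror '_'
  let g2 := sessionAltGroup codes '_'
  let g3 := sessionAltGroup grades '.'
  let g4 := sessionAltGroup executions '_'
  let st := lista.foldl
    (fun (st : List String × List String × List String × List String) l =>
      let key := PySem.List.slice l.toList none (some (PySem.List.len l.toList - 5))  -- l[:len(l)-5]
      (st.1 ++ g1.getD key [], st.2.1 ++ g2.getD key [],
       st.2.2.1 ++ g3.getD key [], st.2.2.2 ++ g4.getD key []))
    ([], [], [], [])
  [st.1, st.2.1, st.2.2.1, st.2.2.2]

-- ===== PRECONDITION & SPEC =====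
def Spec_session (codemirror : List String) (codes : List String) (grades : List String) (executions : List String) (lista : List String) (turma : Int) (out : List (List String)) : Prop := out = session_alt codemirror codes grades executions lista turma
instance (codemirror : List String) (codes : List String) (grades : List String) (executions : List String) (lista : List String) (turma : Int) (out : List (List String)) : Decidable (Spec_session codemirror codes grades executions lista turma out) := by unfold Spec_session; infer_instance

-- ===== CLAIM (what is proved, stated in full; the proofs are below) =====
def Claim_equal_session : Prop := ∀ (codemirror : List String) (codes : List String) (grades : List String) (executions : List String) (lista : List String) (turma : Int), Dom_session codemirror codes grades executions lista turma → Spec_session codemirror codes grades executions lista turma (session codemirror codes grades executions lista turma)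

-- ===== LEMMAS AND PROOFS =====
theorem sessionPref_eq_takeWhile (cs : List Char) (stop : Char) :
    sessionPref cs stop = cs.takeWhile (fun c => c != stop) := by
  induction cs with
  | nil => rfl
  | cons c cs ih =>
    by_cases h : c = stop <;> simp [sessionPref, h, ih]

theorem sessionAltGroup_getD (items : List String) (stop : Char) (key : List Char) (d : PySem.Dict (List Char) (List String)) :
    (items.foldl (fun d x => d.modify (x.toList.takeWhile (fun c => c != stop)) [] (· ++ [x])) d).getD key [] =
      d.getD key [] ++ items.filter (fun s => key == s.toList.takeWhile (fun c => c != stop)) := by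
  induction items generalizing d with
  | nil => simp
  | cons s rest ih =>
    rw [List.foldl_cons, ih, PySem.Dict.getD_modify, List.filter_cons]
    by_cases h : key = s.toList.takeWhile (fun c => c != stop) <;> simp [h]

theorem sessionScan_eq (items : List String) (stop : Char) (key : List Char) (acc : List String) :
    sessionScan items stop key acc = acc ++ (sessionAltGroup items stop).getD key [] := by
  unfold sessionScan sessionAltGroup
  have h := PySem.List.foldl_append_if (fun s => key == sessionPref s.toList stop) id items acc
  simp only [id_eq] at h
  rw [h, sessionAltGroup_getD, PySem.Dict.getD_empty]
  simp [sessionPref_eq_takeWhile]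

theorem session_spec : Claim_equal_session := by
  intro codemirror codes grades executions lista turma _
  unfold Spec_session session session_alt
  simp only [sessionScan_eq]

-- ===== VERDICT (by name: the statement is the Claim_ definition above) =====
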